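-- pv_equiv track=rewrite | github.com/ayukyo/alltoolkit | Python/rotation_cipher_utils/mod.py | rot18
-- ===== SOURCE A (Python) =====
-- def rot18(text: str) -> str:
--     """
--     Apply ROT18 cipher (combination of ROT13 + ROT5).
--
--     ROT18 rotates letters by 13 and digits by 5.
--     It is its own inverse.
--
--     Args:
--         text: Input text
--
--     Returns:
--         ROT18 transformed text
--
--     Examples:
--         >>> rot18('Hello123')
--         'Uryyb678'
--         >>> rot18('Uryyb678')
--         'Hello123'
--     """
--     result = []
--     for char in text:
--         if char.isupper():
--             result.append(chr((ord(char) - ord('A') + 13) % 26 + ord('A')))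
--         elif char.islower():
--             result.append(chr((ord(char) - ord('a') + 13) % 26 + ord('a')))
--         elif char.isdigit():
--             result.append(str((int(char) + 5) % 10))
--         else:
--             result.append(char)
--     return ''.join(result)
-- ===== SOURCE B (Python) =====
-- def rot18(text: str) -> str:
--     src = 'ABCDEFGHIJKLMNOPQRSTUVWXYZabcdefghijklmnopqrstuvwxyz0123456789'
--     dst = 'NOPQRSTUVWXYZABCDEFGHIJKLMnopqrstuvwxyzabcdefghijklm5678901234'
--     return text.translate(str.maketrans(src, dst))
-- ===== Notes on version B (the rewrite author's own statement) =====
-- stated objective: idiomatic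
-- what changed: Replaces the per-character branch-and-append loop with a translation table built once via str.maketrans and a single text.translate call; all case/digit branching moves into table construction.
import Mathlib
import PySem

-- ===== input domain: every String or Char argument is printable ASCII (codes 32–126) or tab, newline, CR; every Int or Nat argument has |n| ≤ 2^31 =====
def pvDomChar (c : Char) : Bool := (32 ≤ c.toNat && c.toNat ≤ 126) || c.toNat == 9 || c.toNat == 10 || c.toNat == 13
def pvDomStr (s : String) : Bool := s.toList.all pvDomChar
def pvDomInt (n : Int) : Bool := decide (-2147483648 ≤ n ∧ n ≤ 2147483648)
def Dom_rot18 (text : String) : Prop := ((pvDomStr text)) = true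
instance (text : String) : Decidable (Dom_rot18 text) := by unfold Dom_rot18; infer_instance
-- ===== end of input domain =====

-- B replaces the per-character branch loop by one precomputed translation table and a single translate pass (return value only).

-- ===== PORT A =====
-- one loop step: the list of characters appended for char c (the digit branch appends str((int(c)+5)%10));
-- int(char) is ported as PySem.Int.ofStr? with getD 0, exact since the branch is guarded by isdigit
def rot18Step (c : Char) : List Char :=
  if PySem.Str.isupper c then [Char.ofNat ((c.toNat - 65 + 13) % 26 + 65)]
  else if PySem.Str.islower c then [Char.ofNat ((c.toNat - 97 + 13) % 26 + 97)]
  else if PySem.Str.isdigit c then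
    (PySem.Int.toStr (PySem.Int.mod ((PySem.Int.ofStr? (String.mk [c])).getD 0 + 5) 10)).toList
  else [c]

def rot18 (text : String) : String :=
  String.mk (text.toList.foldl (fun acc c => acc ++ rot18Step c) [])

-- ===== PORT B =====
-- str.maketrans(src, dst) builds a translation table once; ported as a PySem.Dict keyed by chars
def rot18Table : PySem.Dict Char Char :=
  PySem.Dict.ofList
    ("ABCDEFGHIJKLMNOPQRSTUVWXYZabcdefghijklmnopqrstuvwxyz0123456789".toList.zip
     "NOPQRSTUVWXYZABCDEFGHIJKLMnopqrstuvwxyzabcdefghijklm5678901234".toList)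

-- text.translate(table): each char replaced by its table image, unmapped chars pass through
def rot18_alt (text : String) : String :=
  String.mk (text.toList.map (fun c => (PySem.Dict.get? rot18Table c).getD c))

-- ===== PRECONDITION & SPEC =====
def Spec_rot18 (text : String) (out : String) : Prop := out = rot18_alt text
instance (text : String) (out : String) : Decidable (Spec_rot18 text out) := by unfold Spec_rot18; infer_instance

-- ===== CLAIM (what is proved, stated in full; the proofs are below) =====
def Claim_equal_rot18 : Prop := ∀ (text : String), Dom_rot18 text → Spec_rot18 text (rot18 text)

-- ===== LEMMAS AND PROOFS =====

-- per-character agreement on all 7-bit chars (covers the whole Dom alphabet)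
set_option maxRecDepth 4000 in
theorem rot18Step_eq_fin : ∀ n : Fin 128,
    rot18Step (Char.ofNat n.val) = [(PySem.Dict.get? rot18Table (Char.ofNat n.val)).getD (Char.ofNat n.val)] := by
  decide

theorem rot18Step_eq (c : Char) (h : pvDomChar c = true) :
    rot18Step c = [(PySem.Dict.get? rot18Table c).getD c] := by
  have hlt : c.toNat < 128 := by
    simp only [pvDomChar, Bool.or_eq_true, Bool.and_eq_true, decide_eq_true_eq, beq_iff_eq] at h
    omega
  have := rot18Step_eq_fin ⟨c.toNat, hlt⟩
  simpa [Char.ofNat_toNat] using this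

-- ===== VERDICT (by name: the statement is the Claim_ definition above) =====
theorem rot18_flatMap_eq (l : List Char) (h : ∀ c ∈ l, pvDomChar c = true) :
    l.flatMap rot18Step = l.map (fun c => (PySem.Dict.get? rot18Table c).getD c) := by
  induction l with
  | nil => rfl
  | cons c cs ih =>
    simp only [List.flatMap_cons, List.map_cons]
    rw [rot18Step_eq c (h c (by simp)), ih (fun x hx => h x (by simp [hx]))]
    rfl

theorem rot18_spec : Claim_equal_rot18 := by
  intro text hdom
  unfold Spec_rot18 rot18 rot18_alt
  congr 1
  rw [PySem.List.foldl_append_eq_flatMap, List.nil_append]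
  exact rot18_flatMap_eq _ (by simpa [Dom_rot18, pvDomStr, List.all_eq_true] using hdom)
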